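-- pv_equiv track=rewrite | github.com/qiuqiulee/PycharmProject_LC | mianjing/isSubFull.py | isSubmatrixFull
-- ===== SOURCE A (Python) =====
-- def isSubmatrixFull(matrix):
--     NofCol = len(matrix[0])
--     dic = {}
--     for row in range(3):
--         for col in range(3):
--             dic[matrix[row][col]] = dic.get(matrix[row][col],0)+1
--     j =3
--     res = []
--     res.append(len(dic) ==9)
--     while j<NofCol:
--         for i in range(3):
--             dic[matrix[i][j]] = dic.get(matrix[i][j], 0) + 1
--             dic[matrix[i][j-3]] -= 1
--             if dic[matrix[i][j-3]] ==0:
--                 del dic[matrix[i][j-3]]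
--         res.append(len(dic) ==9)
--         j+=1
--     return res
-- ===== SOURCE B (Python) =====
-- def isSubmatrixFull(matrix):
--     first = {matrix[i][k] for i in range(3) for k in range(3)}
--     res = [len(first) == 9]
--     for j in range(1, len(matrix[0]) - 2):
--         window = {matrix[i][j + k] for i in range(3) for k in range(3)}
--         res.append(len(window) == 9)
--     return res
-- ===== Notes on version B (the rewrite author's own statement) =====
-- stated objective: simpler
-- what changed: Replaces A's incrementally maintained add/decrement/delete count dictionary with a from-scratch 9-element set built per window start; Pre_ excludes only the inputs on which A (and B) raise IndexError.
import Mathlib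
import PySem

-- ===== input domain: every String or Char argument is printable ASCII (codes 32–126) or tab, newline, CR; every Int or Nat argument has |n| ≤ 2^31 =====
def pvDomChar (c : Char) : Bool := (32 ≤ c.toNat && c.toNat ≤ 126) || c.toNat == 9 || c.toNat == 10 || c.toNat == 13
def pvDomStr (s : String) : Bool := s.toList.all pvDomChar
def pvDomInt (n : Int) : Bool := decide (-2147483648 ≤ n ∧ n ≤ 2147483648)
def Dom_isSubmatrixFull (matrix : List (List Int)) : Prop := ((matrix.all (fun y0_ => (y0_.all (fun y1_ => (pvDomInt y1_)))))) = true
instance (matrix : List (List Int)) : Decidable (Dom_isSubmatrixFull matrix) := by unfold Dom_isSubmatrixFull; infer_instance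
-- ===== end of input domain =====

-- B replaces A's incrementally maintained count dictionary with a per-window from-scratch set of the nine values (simpler, same O(n)).

-- ===== PORT A =====
-- matrix[i][j] (both ports index the matrix this way; exact under Pre_)
def pvIdx (matrix : List (List Int)) (i j : Int) : Int :=
  PySem.List.pyGetD (PySem.List.pyGetD matrix i []) j 0

-- the inner for-loop of A's while loop: slide the count dictionary to the window ending at column j
def pvStepD (matrix : List (List Int)) (d : PySem.Dict Int Int) (j : Int) : PySem.Dict Int Int :=
  (PySem.List.pyRange 0 3 1).foldl (fun d i =>
    let d1 := d.insert (pvIdx matrix i j) (d.getD (pvIdx matrix i j) 0 + 1)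
    let d2 := d1.insert (pvIdx matrix i (j-3)) (d1.getD (pvIdx matrix i (j-3)) 0 - 1)
    if d2.getD (pvIdx matrix i (j-3)) 0 = 0 then d2.erase (pvIdx matrix i (j-3)) else d2) d

-- the body of A's while loop (state = (dic, res))
def pvBody (matrix : List (List Int)) (st : PySem.Dict Int Int × List Bool) (j : Int) :
    PySem.Dict Int Int × List Bool :=
  let d := pvStepD matrix st.1 j
  (d, st.2 ++ [decide (d.size = 9)])

-- A's initial fill of the 3x3 count dictionary
def pvInit (matrix : List (List Int)) : PySem.Dict Int Int :=
  (PySem.List.pyRange 0 3 1).foldl (fun d row =>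
    (PySem.List.pyRange 0 3 1).foldl (fun d col =>
      d.insert (pvIdx matrix row col) (d.getD (pvIdx matrix row col) 0 + 1)) d)
    PySem.Dict.empty

def isSubmatrixFull (matrix : List (List Int)) : List Bool :=
  let NofCol : Int := ((PySem.List.pyGetD matrix 0 []).length : Int)
  let dic : PySem.Dict Int Int := pvInit matrix
  let res : List Bool := [decide (dic.size = 9)]
  ((PySem.List.pyRange 3 NofCol 1).foldl (pvBody matrix) (dic, res)).2

-- ===== PORT B =====
def isSubmatrixFull_alt (matrix : List (List Int)) : List Bool :=
  let first := PySem.Set.ofList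
    ((PySem.List.pyRange 0 3 1).flatMap (fun i =>
      (PySem.List.pyRange 0 3 1).map (fun k => pvIdx matrix i k)))
  let res : List Bool := [decide (PySem.Set.len first = 9)]
  res ++ (PySem.List.pyRange 1 (((PySem.List.pyGetD matrix 0 []).length : Int) - 2) 1).map (fun j =>
    decide (PySem.Set.len (PySem.Set.ofList
      ((PySem.List.pyRange 0 3 1).flatMap (fun i =>
        (PySem.List.pyRange 0 3 1).map (fun k => pvIdx matrix i (j + k))))) = 9))

-- ===== PRECONDITION & SPEC =====
-- Pre_: exactly the inputs on which the Python A returns normally (no IndexError): at least 3 rows,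
-- the first row at least 3 wide, and rows 1 and 2 at least as wide as row 0 (A reads them up to column len(matrix[0])-1).
def Pre_isSubmatrixFull (matrix : List (List Int)) : Prop :=
  3 ≤ matrix.length ∧ 3 ≤ (matrix.getD 0 []).length ∧
  (matrix.getD 0 []).length ≤ (matrix.getD 1 []).length ∧
  (matrix.getD 0 []).length ≤ (matrix.getD 2 []).length
instance (matrix : List (List Int)) : Decidable (Pre_isSubmatrixFull matrix) := by
  unfold Pre_isSubmatrixFull; infer_instance

def pvWitness_isSubmatrixFull : List (List Int) := [[1,2,3],[4,5,6],[7,8,9]]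

def Spec_isSubmatrixFull (matrix : List (List Int)) (out : List Bool) : Prop := out = isSubmatrixFull_alt matrix
instance (matrix : List (List Int)) (out : List Bool) : Decidable (Spec_isSubmatrixFull matrix out) := by unfold Spec_isSubmatrixFull; infer_instance

-- ===== CLAIM (what is proved, stated in full; the proofs are below) =====
def Claim_equal_isSubmatrixFull : Prop := ∀ (matrix : List (List Int)), Dom_isSubmatrixFull matrix → Pre_isSubmatrixFull matrix → Spec_isSubmatrixFull matrix (isSubmatrixFull matrix)

-- ===== LEMMAS AND PROOFS =====

-- the nine values of the 3x3 window whose left column is s, in row-major order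
def pvWin (m : List (List Int)) (s : Int) : List Int :=
  [pvIdx m 0 s, pvIdx m 0 (s+1), pvIdx m 0 (s+2),
   pvIdx m 1 s, pvIdx m 1 (s+1), pvIdx m 1 (s+2),
   pvIdx m 2 s, pvIdx m 2 (s+1), pvIdx m 2 (s+2)]

-- B's per-window boolean
def pvF (m : List (List Int)) (j : Int) : Bool :=
  decide (PySem.Set.len (PySem.Set.ofList (pvWin m j)) = 9)

-- integer-valued occurrence count, and the two pointwise updates A's loop performs
def pvCnt (L : List Int) : Int → Int := fun y => (L.count y : Int)
def pvAddF (c : Int → Int) (x : Int) : Int → Int := fun y => if y = x then c y + 1 else c y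
def pvSubF (c : Int → Int) (x : Int) : Int → Int := fun y => if y = x then c y - 1 else c y

-- the loop invariant: dic is a nodup-keyed counter whose counts are c
def pvInv (d : PySem.Dict Int Int) (c : Int → Int) : Prop :=
  d.keys.Nodup ∧ ∀ x, 0 ≤ c x ∧ d.getD x 0 = c x ∧ (d.contains x = true ↔ c x ≠ 0)

lemma pvAddF_apply (c : Int → Int) (x y : Int) : pvAddF c x y = c y + (if y = x then 1 else 0) := by
  simp only [pvAddF]; split <;> simp
lemma pvSubF_apply (c : Int → Int) (x y : Int) : pvSubF c x y = c y - (if y = x then 1 else 0) := by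
  simp only [pvSubF]; split <;> simp

lemma pvCnt_append_singleton (L : List Int) (x : Int) :
    pvCnt (L ++ [x]) = pvAddF (pvCnt L) x := by
  funext y
  simp only [pvCnt, pvAddF, List.count_append, List.count_singleton]
  by_cases h : y = x
  · simp [h]
  · simp [h, Ne.symm h]

lemma pvInv_empty : pvInv PySem.Dict.empty (pvCnt []) := by
  refine ⟨by simp [PySem.Dict.keys, PySem.Dict.empty], ?_⟩
  intro x
  simp [pvCnt, PySem.Dict.getD_empty, PySem.Dict.contains_empty]

lemma pvInv_add (d : PySem.Dict Int Int) (c : Int → Int) (x : Int) (h : pvInv d c) :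
    pvInv (d.insert x (d.getD x 0 + 1)) (pvAddF c x) := by
  obtain ⟨hn, hf⟩ := h
  refine ⟨PySem.Dict.nodup_keys_insert d x _ hn, ?_⟩
  intro y
  obtain ⟨h0, hg, hc⟩ := hf y
  obtain ⟨h0x, hgx, hcx⟩ := hf x
  by_cases hyx : y = x
  · subst hyx
    refine ⟨by simp [pvAddF]; omega, ?_, ?_⟩
    · simp [pvAddF, PySem.Dict.getD_insert_self, hg]
    · simp [pvAddF, PySem.Dict.contains_insert_self]
      omega
  · refine ⟨by simp [pvAddF, hyx]; omega, ?_, ?_⟩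
    · simp [pvAddF, hyx, PySem.Dict.getD_insert, hg]
    · simp [pvAddF, hyx, PySem.Dict.contains_insert, hc]

lemma pvInv_fold_add (xs : List Int) (d : PySem.Dict Int Int) (L : List Int)
    (h : pvInv d (pvCnt L)) :
    pvInv (xs.foldl (fun d x => d.insert x (d.getD x 0 + 1)) d) (pvCnt (L ++ xs)) := by
  induction xs generalizing d L with
  | nil => simpa using h
  | cons x xs ih =>
    simp only [List.foldl_cons]
    have := ih (d.insert x (d.getD x 0 + 1)) (L ++ [x])
      (by rw [pvCnt_append_singleton]; exact pvInv_add d _ x h)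
    simpa [List.append_assoc] using this

lemma pvErase_get? (d : PySem.Dict Int Int) (k k' : Int) :
    (d.erase k).get? k' = if k' = k then none else d.get? k' := by
  obtain ⟨items⟩ := d
  simp only [PySem.Dict.erase, PySem.Dict.get?]
  induction items with
  | nil => simp
  | cons p rest ih =>
    by_cases h1 : p.1 = k <;> by_cases h2 : k' = k <;>
      by_cases h3 : p.1 = k' <;>
      simp_all

lemma pvErase_keys (d : PySem.Dict Int Int) (k : Int) :
    (d.erase k).keys = d.keys.filter (fun y => !(y == k)) := by
  obtain ⟨items⟩ := d
  simp only [PySem.Dict.erase, PySem.Dict.keys]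
  induction items with
  | nil => simp
  | cons p rest ih => by_cases h1 : p.1 = k <;> simp_all

lemma pvGetD_eq (d : PySem.Dict Int Int) (k : Int) :
    d.getD k 0 = (d.get? k).getD 0 := rfl

lemma pvContains_get? (d : PySem.Dict Int Int) (k : Int) :
    d.contains k = (d.get? k).isSome := PySem.Dict.contains_eq_isSome_get? d k

lemma pvInv_sub (d : PySem.Dict Int Int) (c : Int → Int) (x : Int)
    (hx : 1 ≤ c x) (h : pvInv d c) :
    pvInv (let d1 := d.insert x (d.getD x 0 - 1);
           if d1.getD x 0 = 0 then d1.erase x else d1) (pvSubF c x) := by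
  obtain ⟨hn, hf⟩ := h
  obtain ⟨h0x, hgx, hcx⟩ := hf x
  have hn1 : (d.insert x (d.getD x 0 - 1)).keys.Nodup := PySem.Dict.nodup_keys_insert d x _ hn
  by_cases hz : (d.insert x (d.getD x 0 - 1)).getD x 0 = 0
  · simp only [hz, if_pos]
    refine ⟨?_, ?_⟩
    · rw [pvErase_keys]; exact hn1.filter _
    · intro y
      obtain ⟨h0, hg, hc⟩ := hf y
      by_cases hyx : y = x
      · subst hyx
        rw [PySem.Dict.getD_insert_self] at hz
        refine ⟨by simp [pvSubF]; omega, ?_, ?_⟩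
        · simp [pvSubF, pvGetD_eq, pvErase_get?]; omega
        · simp [pvSubF, pvContains_get?, pvErase_get?]; omega
      · refine ⟨by simp [pvSubF, hyx]; omega, ?_, ?_⟩
        · simp [pvSubF, hyx, pvGetD_eq, pvErase_get?, PySem.Dict.get?_insert, ← hg]
        · rw [pvContains_get?, pvErase_get?]
          simp only [if_neg hyx, PySem.Dict.get?_insert, ← pvContains_get?]
          simp [pvSubF, hyx, hc]
  · simp only [hz, if_false]
    refine ⟨hn1, ?_⟩
    intro y
    obtain ⟨h0, hg, hc⟩ := hf y
    rw [PySem.Dict.getD_insert_self] at hz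
    by_cases hyx : y = x
    · subst hyx
      refine ⟨by simp [pvSubF]; omega, ?_, ?_⟩
      · simp [pvSubF, PySem.Dict.getD_insert_self, hg]
      · simp [pvSubF, PySem.Dict.contains_insert_self]; omega
    · refine ⟨by simp [pvSubF, hyx]; omega, ?_, ?_⟩
      · simp [pvSubF, hyx, PySem.Dict.getD_insert, hg]
      · simp [pvSubF, hyx, PySem.Dict.contains_insert, hc]

lemma pvInv_size (d : PySem.Dict Int Int) (L : List Int) (h : pvInv d (pvCnt L)) :
    d.size = (PySem.Set.ofList L).length := by
  obtain ⟨hn, hf⟩ := h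
  have hmem : ∀ y, y ∈ d.keys ↔ y ∈ PySem.Set.ofList L := by
    intro y
    obtain ⟨h0, hg, hc⟩ := hf y
    rw [PySem.Set.mem_ofList, ← PySem.Dict.contains_iff_mem_keys, hc]
    simp only [pvCnt, ne_eq, Int.natCast_eq_zero]
    rw [← List.count_pos_iff]
    omega
  have hperm : d.keys.Perm (PySem.Set.ofList L) :=
    (List.perm_ext_iff_of_nodup hn (PySem.Set.nodup_ofList L)).2 hmem
  have := hperm.length_eq
  simpa [PySem.Dict.size, PySem.Dict.keys] using this

lemma pvInv_decide (d : PySem.Dict Int Int) (m : List (List Int)) (j : Int)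
    (h : pvInv d (pvCnt (pvWin m j))) :
    decide (d.size = 9) = pvF m j := by
  have hs := pvInv_size d _ h
  rw [pvF, decide_eq_decide, hs]
  simp only [PySem.Set.len]
  omega

lemma pvCnt_l9 (p u1 u2 q u3 u4 r u5 u6 y : Int) :
    pvCnt [p,u1,u2,q,u3,u4,r,u5,u6] y =
    (if p = y then 1 else 0) + (if q = y then 1 else 0) + (if r = y then 1 else 0)
      + (([u1,u2,u3,u4,u5,u6].count y : Int)) := by
  simp only [pvCnt, List.count_cons, List.count_nil, beq_iff_eq]
  push_cast
  ring

-- the symbolic 3-step slide: add a, remove p; add b, remove q; add c, remove r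
lemma pvChain_eq (p u1 u2 q u3 u4 r u5 u6 a b c : Int) :
    pvSubF (pvAddF (pvSubF (pvAddF (pvSubF (pvAddF
      (pvCnt [p,u1,u2,q,u3,u4,r,u5,u6]) a) p) b) q) c) r
      = pvCnt [u1,u2,a,u3,u4,b,u5,u6,c] := by
  funext y
  simp only [pvSubF_apply, pvAddF_apply, pvCnt, List.count_cons, List.count_nil, beq_iff_eq]
  push_cast
  simp only [@eq_comm Int y]
  ring

lemma pvBound1 (p u1 u2 q u3 u4 r u5 u6 a : Int) :
    1 ≤ pvAddF (pvCnt [p,u1,u2,q,u3,u4,r,u5,u6]) a p := by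
  simp only [pvAddF_apply, pvCnt_l9]; split_ifs <;> omega

lemma pvBound2 (p u1 u2 q u3 u4 r u5 u6 a b : Int) :
    1 ≤ pvAddF (pvSubF (pvAddF (pvCnt [p,u1,u2,q,u3,u4,r,u5,u6]) a) p) b q := by
  simp only [pvAddF_apply, pvSubF_apply, pvCnt_l9]; split_ifs <;> omega

lemma pvBound3 (p u1 u2 q u3 u4 r u5 u6 a b c : Int) :
    1 ≤ pvAddF (pvSubF (pvAddF (pvSubF (pvAddF
      (pvCnt [p,u1,u2,q,u3,u4,r,u5,u6]) a) p) b) q) c r := by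
  simp only [pvAddF_apply, pvSubF_apply, pvCnt_l9]; split_ifs <;> omega

lemma pvStep (m : List (List Int)) (J : Int) (d : PySem.Dict Int Int)
    (h : pvInv d (pvCnt (pvWin m (J - 3)))) :
    pvInv (pvStepD m d J) (pvCnt (pvWin m (J - 2))) := by
  have hr : PySem.List.pyRange 0 3 1 = [0, 1, 2] := by decide
  have e1 : J - 3 + 1 = J - 2 := by ring
  have e2 : J - 3 + 2 = J - 1 := by ring
  have e3 : J - 2 + 1 = J - 1 := by ring
  have e4 : J - 2 + 2 = J := by ring
  have hw1 : pvWin m (J-3) =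
      [pvIdx m 0 (J-3), pvIdx m 0 (J-2), pvIdx m 0 (J-1),
       pvIdx m 1 (J-3), pvIdx m 1 (J-2), pvIdx m 1 (J-1),
       pvIdx m 2 (J-3), pvIdx m 2 (J-2), pvIdx m 2 (J-1)] := by
    rw [pvWin, e1, e2]
  have hw2 : pvWin m (J-2) =
      [pvIdx m 0 (J-2), pvIdx m 0 (J-1), pvIdx m 0 J,
       pvIdx m 1 (J-2), pvIdx m 1 (J-1), pvIdx m 1 J,
       pvIdx m 2 (J-2), pvIdx m 2 (J-1), pvIdx m 2 J] := by
    rw [pvWin, e3, e4]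
  rw [hw1] at h
  rw [hw2, ← pvChain_eq (pvIdx m 0 (J-3)) (pvIdx m 0 (J-2)) (pvIdx m 0 (J-1))
        (pvIdx m 1 (J-3)) (pvIdx m 1 (J-2)) (pvIdx m 1 (J-1))
        (pvIdx m 2 (J-3)) (pvIdx m 2 (J-2)) (pvIdx m 2 (J-1))
        (pvIdx m 0 J) (pvIdx m 1 J) (pvIdx m 2 J)]
  simp only [pvStepD, hr, List.foldl_cons, List.foldl_nil]
  exact pvInv_sub _ _ _ (pvBound3 _ _ _ _ _ _ _ _ _ _ _ _)
    (pvInv_add _ _ _ (pvInv_sub _ _ _ (pvBound2 _ _ _ _ _ _ _ _ _ _ _)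
      (pvInv_add _ _ _ (pvInv_sub _ _ _ (pvBound1 _ _ _ _ _ _ _ _ _ _)
        (pvInv_add _ _ _ h)))))

lemma pvLoop (m : List (List Int)) (n : Int) :
    ∀ (k : Nat) (J : Int), (n - J).toNat = k → 3 ≤ J → J ≤ n →
    ∀ (d : PySem.Dict Int Int) (res : List Bool),
    pvInv d (pvCnt (pvWin m (J - 3))) →
    res = (PySem.List.pyRange 0 (J - 2) 1).map (pvF m) →
    ((PySem.List.pyRange J n 1).foldl (pvBody m) (d, res)).2
      = (PySem.List.pyRange 0 (n - 2) 1).map (pvF m) := by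
  intro k
  induction k with
  | zero =>
    intro J hk h3 hJ d res hd hres
    have hJn : J = n := by omega
    subst hJn
    rw [PySem.List.pyRange_one_eq_nil (le_refl J)]
    simpa using hres
  | succ k ih =>
    intro J hk h3 hJ d res hd hres
    have hJn : J < n := by omega
    rw [PySem.List.pyRange_one_cons hJn, List.foldl_cons,
        show pvBody m (d, res) J
          = (pvStepD m d J, res ++ [decide ((pvStepD m d J).size = 9)]) from rfl]
    have hstep := pvStep m J d hd
    have hd' : pvInv (pvStepD m d J) (pvCnt (pvWin m (J + 1 - 3))) := by
      rw [show J + 1 - 3 = J - 2 by ring]; exact hstep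
    have hres' : res ++ [decide ((pvStepD m d J).size = 9)]
        = (PySem.List.pyRange 0 (J + 1 - 2) 1).map (pvF m) := by
      rw [pvInv_decide _ m (J - 2) hstep, hres,
          show J + 1 - 2 = (J - 2) + 1 by ring,
          PySem.List.pyRange_one_succ_right (by omega : (0:Int) ≤ J - 2), List.map_append]
      simp
    exact ih (J + 1) (by omega) (by omega) (by omega) _ _ hd' hres'

-- ===== VERDICT (by name: the statement is the Claim_ definition above) =====
theorem isSubmatrixFull_spec : Claim_equal_isSubmatrixFull := by
  intro m _ hp
  unfold Spec_isSubmatrixFull isSubmatrixFull isSubmatrixFull_alt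
  have hr : PySem.List.pyRange 0 3 1 = [0, 1, 2] := by decide
  have hn0 : PySem.List.pyGetD m 0 ([] : List Int) = m.getD 0 [] := by
    simp [PySem.List.pyGetD_zero]
  have h3 : 3 ≤ ((PySem.List.pyGetD m 0 ([] : List Int)).length : Int) := by
    rw [hn0]; exact_mod_cast hp.2.1
  set n : Int := ((PySem.List.pyGetD m 0 ([] : List Int)).length : Int) with hn
  -- the initial dictionary is a counter of the first window
  have hw0 : pvWin m 0 =
      [pvIdx m 0 0, pvIdx m 0 1, pvIdx m 0 2,
       pvIdx m 1 0, pvIdx m 1 1, pvIdx m 1 2,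
       pvIdx m 2 0, pvIdx m 2 1, pvIdx m 2 2] := by norm_num [pvWin]
  have hdic : pvInv (pvInit m) (pvCnt (pvWin m 0)) := by
    rw [pvInit, hw0]
    have := pvInv_fold_add
      [pvIdx m 0 0, pvIdx m 0 1, pvIdx m 0 2,
       pvIdx m 1 0, pvIdx m 1 1, pvIdx m 1 2,
       pvIdx m 2 0, pvIdx m 2 1, pvIdx m 2 2] PySem.Dict.empty [] pvInv_empty
    simpa [hr] using this
  -- B's window lists are pvWin
  have hb : ∀ j : Int, ((PySem.List.pyRange 0 3 1).flatMap (fun i =>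
      (PySem.List.pyRange 0 3 1).map (fun k => pvIdx m i (j + k)))) = pvWin m j := by
    intro j
    simp [hr, pvWin, add_comm j]
  have hfirstL : ((PySem.List.pyRange 0 3 1).flatMap (fun i =>
      (PySem.List.pyRange 0 3 1).map (fun k => pvIdx m i k))) = pvWin m 0 := by
    rw [hw0]
    simp [hr]
  have hB : (PySem.List.pyRange 1 (n - 2) 1).map (fun j =>
      decide (PySem.Set.len (PySem.Set.ofList
        ((PySem.List.pyRange 0 3 1).flatMap (fun i =>
          (PySem.List.pyRange 0 3 1).map (fun k => pvIdx m i (j + k))))) = 9))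
      = (PySem.List.pyRange 1 (n - 2) 1).map (pvF m) := by
    apply List.map_congr_left
    intro j _
    rw [hb j, pvF]
  rw [hfirstL, hB]
  have hsplit : (PySem.List.pyRange 0 (n - 2) 1).map (pvF m)
      = [decide (PySem.Set.len (PySem.Set.ofList (pvWin m 0)) = 9)]
        ++ (PySem.List.pyRange 1 (n - 2) 1).map (pvF m) := by
    rw [PySem.List.pyRange_one_cons (by omega : (0:Int) < n - 2)]
    rfl
  rw [← hsplit]
  have hres0 : [decide ((pvInit m).size = 9)]
      = (PySem.List.pyRange 0 (3 - 2) 1).map (pvF m) := by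
    rw [pvInv_decide _ m 0 hdic]
    have h01 : PySem.List.pyRange 0 (3 - 2) 1 = [0] := by decide
    rw [h01]
    rfl
  exact pvLoop m n ((n - 3).toNat) 3 rfl (by omega) h3 _ _ (by simpa using hdic) hres0
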